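-- pv_equiv track=rewrite | github.com/Lava188/HomeLab_AI | ai_lab/recommendation/recommendation_controller.py | _ordered_next_slots
-- ===== SOURCE A (Python) =====
-- from typing import Any
--
-- def _ordered_next_slots(flow: dict[str, Any], slot_ids: list[str]) -> list[str]:
--     ordered = []
--     seen = set()
--     for slot_id in flow.get("slot_order", []):
--         if slot_id in slot_ids and slot_id not in seen:
--             ordered.append(slot_id)
--             seen.add(slot_id)
--     for slot_id in slot_ids:
--         if slot_id not in seen:
--             ordered.append(slot_id)
--             seen.add(slot_id)
--     return ordered
-- ===== SOURCE B (Python) =====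
-- def _ordered_next_slots(flow, slot_ids):
--     # Assign every slot a rank: flow's slot_order first (first occurrence),
--     # then remaining slot_ids in first-appearance order; one stable sort by rank.
--     rank = {}
--     for s in flow.get("slot_order", []):
--         rank.setdefault(s, len(rank))
--     for s in slot_ids:
--         rank.setdefault(s, len(rank))
--     return sorted(dict.fromkeys(slot_ids), key=lambda s: rank[s])
-- ===== Notes on version B (the rewrite author's own statement) =====
-- stated objective: alternative
-- what changed: A's two stateful loops that append to an 'ordered' list guarded by a growing 'seen' set are replaced by building a rank table (flow's slot_order first, then remaining slot_ids by first appearance) and one stable sort of the deduplicated slot_ids by rank.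
import Mathlib
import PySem

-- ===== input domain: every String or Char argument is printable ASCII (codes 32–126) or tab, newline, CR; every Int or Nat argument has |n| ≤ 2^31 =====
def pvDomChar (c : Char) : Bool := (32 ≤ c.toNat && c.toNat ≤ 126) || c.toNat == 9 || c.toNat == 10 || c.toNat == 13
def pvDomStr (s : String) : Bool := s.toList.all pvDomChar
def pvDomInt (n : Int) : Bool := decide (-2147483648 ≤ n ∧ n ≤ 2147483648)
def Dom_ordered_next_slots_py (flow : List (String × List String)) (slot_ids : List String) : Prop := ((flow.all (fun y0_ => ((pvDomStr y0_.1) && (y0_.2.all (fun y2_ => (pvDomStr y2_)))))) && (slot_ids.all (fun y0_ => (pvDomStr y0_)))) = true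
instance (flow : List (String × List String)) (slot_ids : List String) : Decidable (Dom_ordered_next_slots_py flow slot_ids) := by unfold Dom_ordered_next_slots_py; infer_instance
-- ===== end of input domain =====

-- B replaces A's two stateful append/seen loops by a rank table (flow order first,
-- then first appearance) and one stable sort of the deduplicated slot_ids by rank;
-- same value everywhere, objective: alternative decomposition.

-- ===== PORT A =====
def ordered_next_slots_py (flow : List (String × List String)) (slot_ids : List String) : List String :=
  -- (ordered, seen) threaded through both loops; flow.get("slot_order", []) = Dict.getD
  (slot_ids.foldl (fun st slot_id =>
      if ¬ slot_id ∈ st.2 then (st.1 ++ [slot_id], PySem.Set.add st.2 slot_id)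
      else st)
    (((PySem.Dict.ofList flow).getD "slot_order" []).foldl (fun st slot_id =>
      if slot_id ∈ slot_ids ∧ ¬ slot_id ∈ st.2 then (st.1 ++ [slot_id], PySem.Set.add st.2 slot_id)
      else st) ([], PySem.Set.empty))).1

-- ===== PORT B =====
def ordered_next_slots_py_alt (flow : List (String × List String)) (slot_ids : List String) : List String :=
  -- rank = {} built by two setdefault loops; rank[s] in the sort key: every s in
  -- dedup(slot_ids) is a key of rank, so Python's rank[s] never raises; getD 0 is
  -- that always-successful lookup (the default is unreachable)
  PySem.List.sorted (PySem.List.dedup slot_ids)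
    (fun s => (slot_ids.foldl (fun d s => d.setdefault s (d.size : Int))
        (((PySem.Dict.ofList flow).getD "slot_order" []).foldl
          (fun d s => d.setdefault s (d.size : Int)) PySem.Dict.empty)).getD s 0)

-- ===== PRECONDITION & SPEC =====
def Spec_ordered_next_slots_py (flow : List (String × List String)) (slot_ids : List String) (out : List String) : Prop := out = ordered_next_slots_py_alt flow slot_ids
instance (flow : List (String × List String)) (slot_ids : List String) (out : List String) : Decidable (Spec_ordered_next_slots_py flow slot_ids out) := by unfold Spec_ordered_next_slots_py; infer_instance

-- ===== CLAIM (what is proved, stated in full; the proofs are below) =====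
def Claim_equal_ordered_next_slots_py : Prop := ∀ (flow : List (String × List String)) (slot_ids : List String), Dom_ordered_next_slots_py flow slot_ids → Spec_ordered_next_slots_py flow slot_ids (ordered_next_slots_py flow slot_ids)

-- ===== LEMMAS AND PROOFS =====

-- A's first loop, with ordered list and seen set advancing in lockstep
lemma pv_loop1 (sids l : List String) (s : PySem.Set String) :
    l.foldl (fun st x =>
        if x ∈ sids ∧ ¬ x ∈ st.2 then (st.1 ++ [x], PySem.Set.add st.2 x) else st) (s, s)
      = ((l.filter (fun x => decide (x ∈ sids))).foldl PySem.Set.add s,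
         (l.filter (fun x => decide (x ∈ sids))).foldl PySem.Set.add s) := by
  induction l generalizing s with
  | nil => simp
  | cons x xs ih =>
    by_cases hm : x ∈ sids
    · by_cases hx : x ∈ s
      · simpa [hm, hx, PySem.Set.add_of_mem hx] using ih s
      · simpa [hm, hx, PySem.Set.add_of_not_mem hx] using ih (s ++ [x])
    · simpa [hm] using ih s

-- A's second loop
lemma pv_loop2 (l : List String) (st0 : List String × PySem.Set String) (h : st0.2 = st0.1) :
    (l.foldl (fun st x =>
        if ¬ x ∈ st.2 then (st.1 ++ [x], PySem.Set.add st.2 x) else st) st0).1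
      = PySem.Set.update st0.1 l := by
  induction l generalizing st0 with
  | nil => simp [PySem.Set.update]
  | cons x xs ih =>
    obtain ⟨a, s⟩ := st0
    simp only at h
    subst h
    by_cases hx : x ∈ s
    · simpa [hx, PySem.Set.update_cons, PySem.Set.add_of_mem hx] using ih (s, s) rfl
    · simpa [hx, PySem.Set.update_cons, PySem.Set.add_of_not_mem hx]
        using ih (s ++ [x], PySem.Set.add s x) (PySem.Set.add_of_not_mem hx)

-- dedup commutes with filter
lemma pv_ofList_filter (p : String → Bool) (xs : List String) :
    PySem.Set.ofList (xs.filter p) = (PySem.Set.ofList xs).filter p := by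
  induction xs with
  | nil => simp [PySem.Set.ofList]
  | cons x xs ih =>
    by_cases hp : p x
    · rw [List.filter_cons_of_pos hp, PySem.Set.ofList_cons, PySem.Set.ofList_cons,
        List.filter_cons_of_pos hp, ih]
      simp [PySem.Set.discard, List.filter_filter, Bool.and_comm]
    · rw [List.filter_cons_of_neg hp, PySem.Set.ofList_cons, List.filter_cons_of_neg hp, ih,
        PySem.Set.discard, List.filter_filter]
      apply List.filter_congr
      intro y _
      by_cases hy : p y
      · have hne : (y == x) = false :=
          beq_eq_false_iff_ne.mpr (fun h => hp (by rw [← h]; exact hy))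
        simp [hy, hne]
      · simp [hy]

-- keys of the rank-building fold
lemma pv_rank_keys (l : List String) (d : PySem.Dict String Int) :
    (l.foldl (fun d s => d.setdefault s (d.size : Int)) d).keys = PySem.Set.update d.keys l := by
  induction l generalizing d with
  | nil => simp [PySem.Set.update]
  | cons x xs ih =>
    rw [List.foldl_cons, PySem.Set.update_cons, ih]
    congr 1
    rw [PySem.Dict.keys_setdefault]
    by_cases h : d.contains x = true
    · simp [h, PySem.Set.add_of_mem ((PySem.Dict.contains_iff_mem_keys d x).1 h)]
    · have hx : x ∉ d.keys := fun hm =>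
        h ((PySem.Dict.contains_iff_mem_keys d x).2 hm)
      simp [h, PySem.Set.add_of_not_mem hx]

-- item values of the rank dict are the running indices of its keys
def pvQ (d : PySem.Dict String Int) : Prop :=
  d.items = d.keys.zipIdx.map (fun p => (p.1, (p.2 : Int)))

lemma pv_rank_items (l : List String) (d : PySem.Dict String Int) (h : pvQ d) :
    pvQ (l.foldl (fun d s => d.setdefault s (d.size : Int)) d) := by
  induction l generalizing d with
  | nil => simpa using h
  | cons x xs ih =>
    rw [List.foldl_cons]
    apply ih
    by_cases hc : d.contains x = true
    · rwa [PySem.Dict.setdefault_of_contains d _ hc]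
    · have hc' : d.contains x = false := by simpa using hc
      rw [PySem.Dict.setdefault_of_not_contains d _ hc']
      unfold pvQ
      rw [PySem.Dict.items_insert_of_not_contains d _ hc',
        PySem.Dict.keys_insert_of_not_contains d _ hc', List.zipIdx_append, h]
      have hlen : d.keys.length = d.items.length := by
        simp [PySem.Dict.keys]
      simp [PySem.Dict.size, hlen]

-- first-match lookup in a list of pairs with nodup keys, at index i
lemma pv_find_at (l : List (String × Int)) (h : (l.map Prod.fst).Nodup)
    (i : ℕ) (hi : i < l.length) :
    (l.find? (fun p => p.1 == (l[i]).1)) = some l[i] := by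
  induction l generalizing i with
  | nil => simp at hi
  | cons a l ih =>
    rcases i with _ | i
    · simp
    · have hi' : i < l.length := by simpa using hi
      have hne : (a.1 == (l[i]).1) = false := by
        have hmem : (l[i]).1 ∈ l.map Prod.fst := by
          exact List.mem_map_of_mem (List.getElem_mem hi')
        have := (List.nodup_cons.mp h).1
        exact beq_eq_false_iff_ne.mpr (fun he => this (he ▸ hmem))
      have := ih (List.nodup_cons.mp h).2 i hi'
      simp [hne, this]

-- ===== assembling the two sides =====

-- everything about the rank dict, for a generic slot_order list `so`
lemma pv_rank_getD (so sids : List String) (i : ℕ)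
    (hi : i < (PySem.Set.update (PySem.Set.ofList so) sids).length) :
    (sids.foldl (fun d s => d.setdefault s (d.size : Int))
        (so.foldl (fun d s => d.setdefault s (d.size : Int)) PySem.Dict.empty)).getD
      ((PySem.Set.update (PySem.Set.ofList so) sids)[i]) 0 = (i : Int) := by
  set R := sids.foldl (fun d s => d.setdefault s (d.size : Int))
      (so.foldl (fun d s => d.setdefault s (d.size : Int)) PySem.Dict.empty) with hR
  have hkeys : R.keys = PySem.Set.update (PySem.Set.ofList so) sids := by
    rw [hR, pv_rank_keys, pv_rank_keys]
    simp [PySem.Dict.keys, PySem.Dict.empty, PySem.Set.update, PySem.Set.ofList_eq_foldl]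
  have hQ : pvQ R := by
    rw [hR]
    apply pv_rank_items
    apply pv_rank_items
    simp [pvQ, PySem.Dict.empty, PySem.Dict.keys]
  have hnodup : R.keys.Nodup := by
    rw [hkeys]
    exact PySem.Set.nodup_update _ _ (PySem.Set.nodup_ofList so)
  have hilen : i < R.keys.length := by rw [hkeys]; exact hi
  have hkmap : R.keys = R.items.map Prod.fst := by simp [PySem.Dict.keys]
  have hitems_len : i < R.items.length := by
    rw [hQ]; simpa using hilen
  have hitem : R.items[i]'hitems_len = (R.keys[i]'hilen, (i : Int)) := by
    rw [List.getElem_of_eq hQ]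
    simp
  have hfind := pv_find_at R.items (by rw [← hkmap]; exact hnodup) i hitems_len
  rw [hitem] at hfind
  have hfind' : R.items.find? (fun p => p.1 == R.keys[i]'hilen)
      = some (R.keys[i]'hilen, (i : Int)) := hfind
  have hget : R.get? (R.keys[i]'hilen) = some ((i : Int)) := by
    unfold PySem.Dict.get?
    rw [hfind']
    rfl
  have hidx : (PySem.Set.update (PySem.Set.ofList so) sids)[i]'hi = R.keys[i]'hilen :=
    List.getElem_of_eq hkeys.symm hi
  rw [PySem.Dict.getD_eq_get?_getD, hidx, hget]
  rfl

lemma pv_main (so sids : List String) :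
    (PySem.Set.ofList (so.filter (fun x => decide (x ∈ sids)))).update sids
      = PySem.List.sorted (PySem.List.dedup sids)
          (fun s => (sids.foldl (fun d s => d.setdefault s (d.size : Int))
              (so.foldl (fun d s => d.setdefault s (d.size : Int)) PySem.Dict.empty)).getD s 0) := by
  set kf : String → Int := fun s =>
    (sids.foldl (fun d s => d.setdefault s (d.size : Int))
        (so.foldl (fun d s => d.setdefault s (d.size : Int)) PySem.Dict.empty)).getD s 0 with hkf
  set S1 : PySem.Set String := PySem.Set.ofList (so.filter (fun x => decide (x ∈ sids))) with hS1
  set rkeys : List String := PySem.Set.update (PySem.Set.ofList so) sids with hrk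
  -- the left-hand side, written as two chunks
  have hLHS : S1.update sids
      = S1 ++ (PySem.Set.ofList sids).filter (fun y => !(PySem.Set.ofList so).contains y) := by
    rw [PySem.Set.update_eq_append_filter]
    congr 1
    apply List.filter_congr
    intro y hy
    have hy' : y ∈ sids := (PySem.Set.mem_ofList sids y).1 hy
    rw [Bool.eq_iff_iff]
    simp [hS1, PySem.Set.contains, PySem.Set.mem_ofList, List.mem_filter, hy']
  -- pairwise key order on the full key list
  have hpw : List.Pairwise (fun a b => kf a < kf b) rkeys := by
    rw [List.pairwise_iff_getElem]
    intro i j hi hj hij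
    show kf rkeys[i] < kf rkeys[j]
    have hi' : i < ((PySem.Set.ofList so).update sids).length := by rw [← hrk]; exact hi
    have hj' : j < ((PySem.Set.ofList so).update sids).length := by rw [← hrk]; exact hj
    have e1 : kf rkeys[i] = (i : Int) := pv_rank_getD so sids i hi'
    have e2 : kf rkeys[j] = (j : Int) := pv_rank_getD so sids j hj'
    rw [e1, e2]
    exact_mod_cast hij
  -- the claimed result list is a sublist of rkeys
  have hsub : (S1 ++ (PySem.Set.ofList sids).filter (fun y => !(PySem.Set.ofList so).contains y)).Sublist rkeys := by
    rw [hrk, PySem.Set.update_eq_append_filter]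
    apply List.Sublist.append
    · rw [hS1, pv_ofList_filter]
      exact List.filter_sublist
    · exact List.Sublist.refl _
  -- the claimed result list is a permutation of dedup sids
  have hperm : (S1 ++ (PySem.Set.ofList sids).filter (fun y => !(PySem.Set.ofList so).contains y)).Perm
      (PySem.Set.ofList sids) := by
    have h1 : S1.Perm ((PySem.Set.ofList sids).filter (fun y => (PySem.Set.ofList so).contains y)) := by
      rw [List.perm_ext_iff_of_nodup (PySem.Set.nodup_ofList _)
        ((PySem.Set.nodup_ofList sids).filter _)]
      intro y
      simp [PySem.Set.mem_ofList, List.mem_filter, PySem.Set.contains]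
      tauto
    exact (h1.append_right _).trans (List.filter_append_perm _ _)
  rw [hLHS, PySem.List.dedup_eq_ofList]
  exact (PySem.List.sorted_eq_of_perm_of_pairwise_lt _ _ kf hperm (hpw.sublist hsub)).symm

-- ===== VERDICT (by name: the statement is the Claim_ definition above) =====
theorem ordered_next_slots_py_spec : Claim_equal_ordered_next_slots_py := by
  intro flow slot_ids _
  unfold Spec_ordered_next_slots_py ordered_next_slots_py ordered_next_slots_py_alt
  set so := (PySem.Dict.ofList flow).getD "slot_order" [] with hso
  rw [show (PySem.Set.empty : PySem.Set String) = ([] : PySem.Set String) from rfl]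
  rw [pv_loop1 slot_ids so ([] : PySem.Set String)]
  rw [pv_loop2 slot_ids _ rfl]
  rw [show (List.foldl PySem.Set.add ([] : PySem.Set String)
        (so.filter (fun x => decide (x ∈ slot_ids))))
      = PySem.Set.ofList (so.filter (fun x => decide (x ∈ slot_ids))) from
    (PySem.Set.ofList_eq_foldl _).symm]
  exact pv_main so slot_ids
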